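-- pv_equiv track=rewrite | github.com/SlicerDMRI/DeepMultiConnectome | utils/label_encoding.py | generate_label_dict
-- ===== SOURCE A (Python) =====
-- def generate_label_dict(num_labels=85, method='symmetric'):
--     """Generate encoding dictionary for ROI pair labels."""
--     label_dict = {}
--     if method == 'default':
--         for i in range(num_labels):
--             for j in range(num_labels):
--                 label_dict[(i, j)] = i * num_labels + j
--     elif method == 'symmetric':
--         index = 0
--         for i in range(num_labels):
--             for j in range(i, num_labels):
--                 label_dict[(i, j)] = index
--                 index += 1
--     return label_dict
-- ===== SOURCE B (Python) =====
-- def generate_label_dict(num_labels=85, method='symmetric'):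
--     """Generate encoding dictionary for ROI pair labels."""
--     # Same pairs, but each encoding comes from a stateless closed-form
--     # (triangular) index instead of a running counter.
--     if method == 'default':
--         return {(i, j): i * num_labels + j
--                 for i in range(num_labels)
--                 for j in range(num_labels)}
--     if method == 'symmetric':
--         return {(i, j): i * num_labels - i * (i - 1) // 2 + (j - i)
--                 for i in range(num_labels)
--                 for j in range(i, num_labels)}
--     return {}
-- ===== Notes on version B (the rewrite author's own statement) =====
-- stated objective: simpler
-- what changed: Replaced the sequential 'index' accumulator of the symmetric branch by a stateless closed-form triangular index i*num_labels - i*(i-1)//2 + (j-i), and both loop nests by dict comprehensions.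
import Mathlib
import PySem

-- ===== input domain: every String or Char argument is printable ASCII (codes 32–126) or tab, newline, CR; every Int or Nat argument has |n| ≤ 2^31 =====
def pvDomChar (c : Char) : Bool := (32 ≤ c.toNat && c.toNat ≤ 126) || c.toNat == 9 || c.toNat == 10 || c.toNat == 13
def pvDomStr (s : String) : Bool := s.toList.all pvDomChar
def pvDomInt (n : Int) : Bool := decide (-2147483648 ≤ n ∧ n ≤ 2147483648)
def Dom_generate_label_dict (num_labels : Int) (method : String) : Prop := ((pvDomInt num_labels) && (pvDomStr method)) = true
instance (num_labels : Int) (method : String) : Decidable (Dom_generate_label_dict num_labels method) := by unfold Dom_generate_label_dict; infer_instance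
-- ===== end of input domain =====

-- B replaces the running `index` counter of the symmetric branch by a stateless
-- closed-form triangular index per pair (objective: simpler, dict comprehensions).


-- ===== PORT A =====
-- the dict is marshalled to the required List (Int × Int × Int) as its items, key pair flattened
def generate_label_dict (num_labels : Int) (method : String) : List (Int × Int × Int) :=
  let label_dict : PySem.Dict (Int × Int) Int := PySem.Dict.empty
  let final : PySem.Dict (Int × Int) Int :=
    if method == "default" then
      (PySem.List.pyRange 0 num_labels).foldl (fun d i =>
        (PySem.List.pyRange 0 num_labels).foldl (fun d j =>
          d.insert (i, j) (i * num_labels + j)) d) label_dict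
    else if method == "symmetric" then
      ((PySem.List.pyRange 0 num_labels).foldl
        (fun (s : PySem.Dict (Int × Int) Int × Int) i =>
          (PySem.List.pyRange i num_labels).foldl
            (fun s j => (s.1.insert (i, j) s.2, s.2 + 1)) s)
        (label_dict, 0)).1
    else label_dict
  final.items.map (fun p => (p.1.1, p.1.2, p.2))

-- ===== PORT B =====
-- Source B's dict comprehensions have pairwise-distinct keys, so the resulting dict's
-- items are exactly the generated pairs in generation order.
def generate_label_dict_alt (num_labels : Int) (method : String) : List (Int × Int × Int) :=
  if method == "default" then
    (PySem.List.pyRange 0 num_labels).flatMap (fun i =>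
      (PySem.List.pyRange 0 num_labels).map (fun j => (i, j, i * num_labels + j)))
  else if method == "symmetric" then
    (PySem.List.pyRange 0 num_labels).flatMap (fun i =>
      (PySem.List.pyRange i num_labels).map (fun j =>
        (i, j, i * num_labels - PySem.Int.floordiv (i * (i - 1)) 2 + (j - i))))
  else []

-- ===== PRECONDITION & SPEC =====
def Spec_generate_label_dict (num_labels : Int) (method : String) (out : List (Int × Int × Int)) : Prop := out = generate_label_dict_alt num_labels method
instance (num_labels : Int) (method : String) (out : List (Int × Int × Int)) : Decidable (Spec_generate_label_dict num_labels method out) := by unfold Spec_generate_label_dict; infer_instance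

-- ===== CLAIM (what is proved, stated in full; the proofs are below) =====
def Claim_equal_generate_label_dict : Prop := ∀ (num_labels : Int) (method : String), Dom_generate_label_dict num_labels method → Spec_generate_label_dict num_labels method (generate_label_dict num_labels method)

-- ===== LEMMAS AND PROOFS =====

theorem pyRange_nil_of_le {a b : Int} (h : b ≤ a) : PySem.List.pyRange a b = [] := by
  rw [List.eq_nil_iff_forall_not_mem]
  intro x hx
  rw [PySem.List.mem_pyRange_one] at hx
  omega

theorem pyRange_nodup (a b : Int) : (PySem.List.pyRange a b).Nodup := by
  have key : ∀ (f : Nat) (a : Int), (b - a).toNat ≤ f → (PySem.List.pyRange a b).Nodup := by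
    intro f
    induction f with
    | zero =>
      intro a ha
      rw [pyRange_nil_of_le (by omega)]
      exact List.nodup_nil
    | succ f ih =>
      intro a ha
      by_cases h : b ≤ a
      · rw [pyRange_nil_of_le h]; exact List.nodup_nil
      · rw [PySem.List.pyRange_one_cons (by omega)]
        refine List.nodup_cons.2 ⟨?_, ih (a + 1) (by omega)⟩
        intro hmem
        rw [PySem.List.mem_pyRange_one] at hmem
        omega
  exact key (b - a).toNat a le_rfl

-- inner loop of A's symmetric branch: appends one fresh pair per j, index steps by 1
theorem sym_inner (i n : Int) (f : Nat) : ∀ (b : Int), i ≤ b → b ≤ n → (n - b).toNat = f →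
    ∀ (d : PySem.Dict (Int × Int) Int) (idx : Int),
    (∀ j : Int, b ≤ j → (i, j) ∉ d.keys) →
    ((PySem.List.pyRange b n).foldl
        (fun (s : PySem.Dict (Int × Int) Int × Int) j => (s.1.insert (i, j) s.2, s.2 + 1))
        (d, idx)).1.items
      = d.items ++ (PySem.List.pyRange b n).map (fun j => ((i, j), idx + (j - b))) ∧
    ((PySem.List.pyRange b n).foldl
        (fun (s : PySem.Dict (Int × Int) Int × Int) j => (s.1.insert (i, j) s.2, s.2 + 1))
        (d, idx)).2 = idx + (n - b) := by
  induction f with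
  | zero =>
    intro b _ hbn hf d idx _
    have hb : n ≤ b := by omega
    rw [pyRange_nil_of_le hb]
    simp; omega
  | succ f ih =>
    intro b hib hbn hf d idx hfresh
    have hb : b < n := by omega
    rw [PySem.List.pyRange_one_cons hb]
    simp only [List.foldl_cons]
    have hcon : d.contains (i, b) = false := by
      cases h : d.contains (i, b)
      · rfl
      · exact absurd ((PySem.Dict.contains_iff_mem_keys d _).1 h) (hfresh b le_rfl)
    have hitems : (d.insert (i, b) idx).items = d.items ++ [((i, b), idx)] :=
      PySem.Dict.items_insert_of_not_contains d idx hcon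
    have hfresh' : ∀ j : Int, b + 1 ≤ j → (i, j) ∉ (d.insert (i, b) idx).keys := by
      intro j hj hmem
      rcases (PySem.Dict.mem_keys_insert d _ _ _).1 hmem with h | h
      · have : j = b := by exact congrArg Prod.snd h
        omega
      · exact hfresh j (by omega) h
    obtain ⟨h1, h2⟩ := ih (b + 1) (by omega) (by omega) (by omega) (d.insert (i, b) idx) (idx + 1) hfresh'
    constructor
    · rw [h1, hitems, List.append_assoc, List.map_cons]
      congr 1
      simp only [List.cons_append, List.nil_append]
      congr 1
      · congr 1
        omega
      · apply List.map_congr_left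
        intro j _
        congr 1
        omega
    · rw [h2]; omega

-- outer loop of A's symmetric branch: the running counter equals the triangular formula
theorem sym_outer (n : Int) (f : Nat) : ∀ (a : Int), 0 ≤ a → a ≤ n → (n - a).toNat = f →
    ∀ (d : PySem.Dict (Int × Int) Int) (idx : Int),
    (∀ p : Int × Int, p ∈ d.keys → p.1 < a) →
    2 * idx = a * (2 * n - a + 1) →
    ((PySem.List.pyRange a n).foldl
        (fun (s : PySem.Dict (Int × Int) Int × Int) i =>
          (PySem.List.pyRange i n).foldl
            (fun s j => (s.1.insert (i, j) s.2, s.2 + 1)) s)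
        (d, idx)).1.items
      = d.items ++ (PySem.List.pyRange a n).flatMap (fun i =>
          (PySem.List.pyRange i n).map (fun j =>
            ((i, j), i * n - PySem.Int.floordiv (i * (i - 1)) 2 + (j - i)))) := by
  induction f with
  | zero =>
    intro a _ han hf d idx _ _
    have : n ≤ a := by omega
    rw [pyRange_nil_of_le this]
    simp
  | succ f ih =>
    intro a ha0 han hf d idx hkeys hidx
    have hb : a < n := by omega
    rw [PySem.List.pyRange_one_cons hb]
    simp only [List.foldl_cons, List.flatMap_cons]
    have hfresh : ∀ j : Int, a ≤ j → (a, j) ∉ d.keys := by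
      intro j _ hmem
      have := hkeys (a, j) hmem
      omega
    obtain ⟨h1, h2⟩ := sym_inner a n (n - a).toNat a le_rfl (by omega) rfl d idx hfresh
    -- the result of the inner fold, as a pair
    set r := (PySem.List.pyRange a n).foldl
        (fun (s : PySem.Dict (Int × Int) Int × Int) j => (s.1.insert (a, j) s.2, s.2 + 1))
        (d, idx) with hr
    have hfd : PySem.Int.floordiv (a * (a - 1)) 2 = a * n - idx := by
      rw [PySem.Int.floordiv_eq_iff_of_pos (by omega)]
      constructor <;> nlinarith [hidx]
    have hkeys' : ∀ p : Int × Int, p ∈ r.1.keys → p.1 < a + 1 := by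
      intro p hp
      have : r.1.keys = (d.items ++ (PySem.List.pyRange a n).map (fun j => ((a, j), idx + (j - a)))).map Prod.fst := by
        simp only [PySem.Dict.keys, h1]
      rw [this, List.map_append, List.mem_append] at hp
      rcases hp with hp | hp
      · have := hkeys p hp; omega
      · simp only [List.map_map, List.mem_map] at hp
        obtain ⟨j, _, hj⟩ := hp
        rw [← hj]
        exact (by omega : a < a + 1)
    have hidx' : 2 * r.2 = (a + 1) * (2 * n - (a + 1) + 1) := by
      rw [h2]; nlinarith [hidx]
    have := ih (a + 1) (by omega) (by omega) (by omega) r.1 r.2 hkeys' hidx'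
    rw [show ((PySem.List.pyRange (a+1) n).foldl
        (fun (s : PySem.Dict (Int × Int) Int × Int) i =>
          (PySem.List.pyRange i n).foldl
            (fun s j => (s.1.insert (i, j) s.2, s.2 + 1)) s) r) = ((PySem.List.pyRange (a+1) n).foldl
        (fun (s : PySem.Dict (Int × Int) Int × Int) i =>
          (PySem.List.pyRange i n).foldl
            (fun s j => (s.1.insert (i, j) s.2, s.2 + 1)) s) (r.1, r.2)) from by rfl] at this
    rw [this, h1, List.append_assoc]
    congr 2
    apply List.map_congr_left
    intro j _
    rw [hfd]
    congr 1
    omega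

-- outer loop of A's default branch: each pass appends one fresh block
theorem default_outer (n : Int) : ∀ (l : List Int), l.Nodup →
    ∀ (d : PySem.Dict (Int × Int) Int),
    (∀ p : Int × Int, p ∈ d.keys → p.1 ∉ l) →
    (l.foldl (fun d i =>
        (PySem.List.pyRange 0 n).foldl (fun d j => d.insert (i, j) (i * n + j)) d) d).items
      = d.items ++ l.flatMap (fun i =>
          (PySem.List.pyRange 0 n).map (fun j => ((i, j), i * n + j))) := by
  intro l
  induction l with
  | nil => intro _ d _; simp
  | cons i l ih =>
    intro hnd d hkeys
    simp only [List.foldl_cons, List.flatMap_cons]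
    have hfreshi : ∀ j ∈ PySem.List.pyRange 0 n, d.contains (i, j) = false := by
      intro j _
      cases h : d.contains (i, j)
      · rfl
      · have := hkeys (i, j) ((PySem.Dict.contains_iff_mem_keys d _).1 h)
        simp at this
    have hmapnd : ((PySem.List.pyRange 0 n).map (fun j => ((i, j) : Int × Int))).Nodup :=
      (pyRange_nodup 0 n).map (fun x y h => by
        simpa using congrArg Prod.snd h)
    have hin := PySem.Dict.items_foldl_insert_fresh (PySem.List.pyRange 0 n)
      (fun j => ((i, j) : Int × Int)) (fun j => i * n + j) d hfreshi hmapnd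
    rw [List.nodup_cons] at hnd
    have hkeys' : ∀ p : Int × Int, p ∈ ((PySem.List.pyRange 0 n).foldl
        (fun d j => d.insert (i, j) (i * n + j)) d).keys → p.1 ∉ l := by
      intro p hp
      have : ((PySem.List.pyRange 0 n).foldl (fun d j => d.insert (i, j) (i * n + j)) d).keys
          = (d.items ++ (PySem.List.pyRange 0 n).map (fun j => ((i, j), i * n + j))).map Prod.fst := by
        simp only [PySem.Dict.keys, hin]
      rw [this, List.map_append, List.mem_append] at hp
      rcases hp with hp | hp
      · exact fun hl => hkeys p hp (List.mem_cons_of_mem _ hl)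
      · simp only [List.map_map, List.mem_map] at hp
        obtain ⟨j, _, hj⟩ := hp
        rw [← hj]
        exact hnd.1
    rw [ih hnd.2 _ hkeys', hin, List.append_assoc]

-- ===== VERDICT (by name: the statement is the Claim_ definition above) =====
theorem generate_label_dict_spec : Claim_equal_generate_label_dict := by
  intro n method _
  unfold Spec_generate_label_dict generate_label_dict generate_label_dict_alt
  by_cases hd : method == "default"
  · simp only [hd, if_true]
    rw [default_outer n (PySem.List.pyRange 0 n) (pyRange_nodup 0 n) PySem.Dict.empty
      (by intro p hp; simp [PySem.Dict.keys, PySem.Dict.empty] at hp)]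
    simp [List.map_flatMap, List.map_map, Function.comp_def, PySem.Dict.empty]
  · rw [Bool.not_eq_true] at hd
    simp only [hd, Bool.false_eq_true, if_false]
    by_cases hs : method == "symmetric"
    · simp only [hs, if_true]
      by_cases hn : n ≤ 0
      · rw [pyRange_nil_of_le hn]
        simp [PySem.Dict.empty]
      · rw [sym_outer n (n - 0).toNat 0 le_rfl (by omega) rfl PySem.Dict.empty 0
          (by intro p hp; simp [PySem.Dict.keys, PySem.Dict.empty] at hp) (by ring)]
        simp [List.map_flatMap, List.map_map, Function.comp_def, PySem.Dict.empty]
    · rw [Bool.not_eq_true] at hs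
      simp only [hs, Bool.false_eq_true, if_false]
      simp [PySem.Dict.empty]
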